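-- pv_equiv track=rewrite | github.com/Olivia-fsm/AI4All2020-Michigan-NLP | utils/lang_detect_helpers.py | trainBigramLanguageModel
-- ===== SOURCE A (Python) =====
-- from collections import defaultdict
--
-- def trainBigramLanguageModel(tokens):
--     unigram = defaultdict(lambda:0)
--     bigram = defaultdict(lambda:0)
--
--     for token in tokens:
--         unigram[token] += 1
--
--     for i in range(len(tokens) - 1):
--         k = i + 2
--         bigram[' '.join(tokens[i:k])] += 1
--
--     return unigram, bigram
-- ===== SOURCE B (Python) =====
-- from collections import defaultdict
--
-- def trainBigramLanguageModel(tokens):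
--     # Single pass: carry the previous token; count unigram and bigram together.
--     unigram = defaultdict(lambda: 0)
--     bigram = defaultdict(lambda: 0)
--     prev = None
--     for token in tokens:
--         unigram[token] += 1
--         if prev is not None:
--             bigram[prev + ' ' + token] += 1
--         prev = token
--     return unigram, bigram
-- ===== Notes on version B (the rewrite author's own statement) =====
-- stated objective: simpler
-- what changed: Fuses A's two sequential passes (a token loop plus an index loop that re-slices and joins tokens[i:i+2]) into one pass that carries the previous token as state and concatenates it with the current token, with no indexing or slicing.
import Mathlib
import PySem

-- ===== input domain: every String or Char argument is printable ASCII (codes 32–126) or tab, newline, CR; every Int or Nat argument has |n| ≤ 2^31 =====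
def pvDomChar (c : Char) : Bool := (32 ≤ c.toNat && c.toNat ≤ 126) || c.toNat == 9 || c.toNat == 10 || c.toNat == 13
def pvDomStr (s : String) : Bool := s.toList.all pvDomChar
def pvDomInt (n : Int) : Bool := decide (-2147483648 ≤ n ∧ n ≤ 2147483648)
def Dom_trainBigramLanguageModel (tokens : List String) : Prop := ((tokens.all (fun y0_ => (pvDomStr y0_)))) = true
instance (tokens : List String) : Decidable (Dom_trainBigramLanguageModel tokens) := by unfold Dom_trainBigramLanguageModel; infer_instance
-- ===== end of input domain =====

-- B fuses A's two passes (token loop + index loop slicing tokens[i:i+2]) into a single pass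
-- carrying the previous token as state; same return value, proved equal on all inputs.

-- ===== PORT A =====
def trainBigramLanguageModel (tokens : List String) : (List (String × Int)) × (List (String × Int)) :=
  let unigram := tokens.foldl
    (fun d token => d.insert token (d.getD token 0 + 1))
    (PySem.Dict.empty : PySem.Dict String Int)
  let bigram := (PySem.List.pyRange 0 ((tokens.length : Int) - 1) 1).foldl
    (fun d i =>
      let k := i + 2
      let key := PySem.Str.join " " (PySem.List.slice tokens (some i) (some k))
      d.insert key (d.getD key 0 + 1))
    (PySem.Dict.empty : PySem.Dict String Int)
  (unigram.items, bigram.items)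

-- ===== PORT B =====
def trainBigramLanguageModel_alt (tokens : List String) : (List (String × Int)) × (List (String × Int)) :=
  let st := tokens.foldl
    (fun (st : PySem.Dict String Int × PySem.Dict String Int × Option String) token =>
      let uni := st.1.insert token (st.1.getD token 0 + 1)
      let bi :=
        match st.2.2 with
        | some prev =>
            let key := prev ++ " " ++ token
            st.2.1.insert key (st.2.1.getD key 0 + 1)
        | none => st.2.1
      (uni, bi, some token))
    ((PySem.Dict.empty : PySem.Dict String Int), (PySem.Dict.empty : PySem.Dict String Int),
      (none : Option String))
  (st.1.items, st.2.1.items)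

-- ===== PRECONDITION & SPEC =====
def Spec_trainBigramLanguageModel (tokens : List String) (out : (List (String × Int)) × (List (String × Int))) : Prop := out = trainBigramLanguageModel_alt tokens
instance (tokens : List String) (out : (List (String × Int)) × (List (String × Int))) : Decidable (Spec_trainBigramLanguageModel tokens out) := by unfold Spec_trainBigramLanguageModel; infer_instance

-- ===== CLAIM (what is proved, stated in full; the proofs are below) =====
def Claim_equal_trainBigramLanguageModel : Prop := ∀ (tokens : List String), Dom_trainBigramLanguageModel tokens → Spec_trainBigramLanguageModel tokens (trainBigramLanguageModel tokens)

-- ===== LEMMAS AND PROOFS =====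

-- ' '.join of a two-element list is concatenation with a single space
lemma pv_join_pair (a b : String) : PySem.Str.join " " [a, b] = a ++ " " ++ b := by
  apply String.toList_injective
  simp [PySem.Str.join, PySem.Chars.join_cons_cons, PySem.Chars.join_singleton]

-- shifting a 2-slice past the head of the list
lemma pv_slice_shift (t : String) (us : List String) (k : Nat) :
    PySem.List.slice (t :: us) (some ((k : Int) + 1)) (some ((k : Int) + 1 + 2))
      = PySem.List.slice us (some (k : Int)) (some ((k : Int) + 2)) := by
  have h2 : ((k : Int) + 1 + 2) = (((k + 3 : Nat)) : Int) := by push_cast; ring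
  have h1 : ((k : Int) + 1) = (((k + 1 : Nat)) : Int) := by push_cast; ring
  have h3 : ((k : Int) + 2) = (((k + 2 : Nat)) : Int) := by push_cast; ring
  rw [h2, h1, h3, PySem.List.slice_natCast, PySem.List.slice_natCast]
  have e1 : k + 3 - (k + 1) = 2 := by omega
  have e2 : k + 2 - k = 2 := by omega
  rw [e1, e2, List.drop_succ_cons]

-- A's index loop over range(len-1), seen on List.range, is a fold over adjacent pairs
lemma pv_A_range (ts : List String) (d : PySem.Dict String Int) :
    (List.range (ts.length - 1)).foldl
        (fun (d : PySem.Dict String Int) (k : Nat) =>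
          let key := PySem.Str.join " " (PySem.List.slice ts (some (k : Int)) (some ((k : Int) + 2)))
          d.insert key (d.getD key 0 + 1)) d
      = (ts.zip ts.tail).foldl
        (fun (d : PySem.Dict String Int) p =>
          let key := p.1 ++ " " ++ p.2
          d.insert key (d.getD key 0 + 1)) d := by
  induction ts generalizing d with
  | nil => simp
  | cons t us ih =>
      cases us with
      | nil => simp
      | cons u vs =>
          have hlen : (t :: u :: vs).length - 1 = vs.length + 1 := by simp
          rw [hlen, List.range_succ_eq_map, List.foldl_cons, List.foldl_map]
          have hhead : PySem.List.slice (t :: u :: vs) (some ((0 : Nat) : Int)) (some (((0 : Nat) : Int) + 2))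
              = [t, u] := by
            rw [show (((0 : Nat) : Int) + 2) = ((2 : Nat) : Int) from by norm_num,
              PySem.List.slice_natCast]
            rfl
          simp only [List.length_cons, Nat.add_sub_cancel] at ih
          refine Eq.trans (PySem.List.foldl_congr_mem _ _
            (fun (d : PySem.Dict String Int) (k : Nat) =>
              let key := PySem.Str.join " " (PySem.List.slice (u :: vs) (some (k : Int)) (some ((k : Int) + 2)))
              d.insert key (d.getD key 0 + 1)) _ ?_) ?_
          · intro acc k _
            simp only [Nat.cast_succ, pv_slice_shift]
          · rw [ih]
            simp only [List.zip_cons_cons, List.tail_cons, List.foldl_cons]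
            congr 1
            simp only [hhead, pv_join_pair]

-- invariant of B's fused loop once a previous token exists
lemma pv_B_inv (ts : List String) (u b : PySem.Dict String Int) (p : String) :
    ts.foldl
      (fun (st : PySem.Dict String Int × PySem.Dict String Int × Option String) token =>
        let uni := st.1.insert token (st.1.getD token 0 + 1)
        let bi :=
          match st.2.2 with
          | some prev =>
              let key := prev ++ " " ++ token
              st.2.1.insert key (st.2.1.getD key 0 + 1)
          | none => st.2.1
        (uni, bi, some token)) (u, b, some p)
      = (ts.foldl (fun d token => d.insert token (d.getD token 0 + 1)) u,
         ((p :: ts).zip ts).foldl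
           (fun d q =>
             let key := q.1 ++ " " ++ q.2
             d.insert key (d.getD key 0 + 1)) b,
         some (ts.getLastD p)) := by
  induction ts generalizing u b p with
  | nil => simp
  | cons t ts ih =>
      simp only [List.foldl_cons, List.zip_cons_cons, List.getLastD_cons]
      rw [ih]

-- ===== VERDICT (by name: the statement is the Claim_ definition above) =====
theorem trainBigramLanguageModel_spec : Claim_equal_trainBigramLanguageModel := by
  intro tokens _
  unfold Spec_trainBigramLanguageModel trainBigramLanguageModel trainBigramLanguageModel_alt
  cases tokens with
  | nil => rfl
  | cons t ts =>
      simp only [List.foldl_cons]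
      rw [pv_B_inv]
      have hA :
          (PySem.List.pyRange 0 (((t :: ts).length : Int) - 1) 1).foldl
            (fun d i =>
              let k := i + 2
              let key := PySem.Str.join " " (PySem.List.slice (t :: ts) (some i) (some k))
              d.insert key (d.getD key 0 + 1))
            (PySem.Dict.empty : PySem.Dict String Int)
          = ((t :: ts).zip ts).foldl
            (fun d q =>
              let key := q.1 ++ " " ++ q.2
              d.insert key (d.getD key 0 + 1)) (PySem.Dict.empty : PySem.Dict String Int) := by
        rw [PySem.List.pyRange_one]
        have ht : ((((t :: ts).length : Int) - 1) - 0).toNat = (t :: ts).length - 1 := by omega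
        rw [ht, List.foldl_map]
        have := pv_A_range (t :: ts) (PySem.Dict.empty : PySem.Dict String Int)
        simp only [List.tail_cons] at this
        rw [← this]
        apply PySem.List.foldl_congr_mem
        intro acc k _
        norm_num
      simp only [hA]
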